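-- pv_equiv track=rewrite | github.com/cirosantilli/project-euler-solutions | solvers/699.py | _is_power_of_3
-- ===== SOURCE A (Python) =====
-- def _is_power_of_3(n: int) -> int:
--     """Return k if n == 3^k, else -1."""
--     if n <= 0:
--         return -1
--     k = 0
--     while n % 3 == 0:
--         n //= 3
--         k += 1
--     return k if n == 1 else -1
-- ===== SOURCE B (Python) =====
-- def _is_power_of_3(n: int) -> int:
--     """Return k if n == 3^k, else -1.
--
--     Closed-form guess-and-verify: estimate the exponent from the exact
--     integer bit length (53/84 is a rational approximation of 1/log2(3),
--     accurate enough that the true exponent is within one of the estimate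
--     for any exponent up to many thousands), then confirm by exact integer
--     comparison on the three candidates.
--     """
--     if n <= 0:
--         return -1
--     k = (n.bit_length() - 1) * 53 // 84
--     for j in (k - 1, k, k + 1):
--         if j >= 0 and 3 ** j == n:
--             return j
--     return -1
-- ===== Notes on version B (the rewrite author's own statement) =====
-- stated objective: alternative
-- what changed: Replaces the repeated divide-by-three stripping loop with a closed-form exponent estimate from the integer bit length (scaled by a fixed rational approximation of the reciprocal binary log of three), verified exactly against the estimate and its two neighbours.
import Mathlib
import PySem

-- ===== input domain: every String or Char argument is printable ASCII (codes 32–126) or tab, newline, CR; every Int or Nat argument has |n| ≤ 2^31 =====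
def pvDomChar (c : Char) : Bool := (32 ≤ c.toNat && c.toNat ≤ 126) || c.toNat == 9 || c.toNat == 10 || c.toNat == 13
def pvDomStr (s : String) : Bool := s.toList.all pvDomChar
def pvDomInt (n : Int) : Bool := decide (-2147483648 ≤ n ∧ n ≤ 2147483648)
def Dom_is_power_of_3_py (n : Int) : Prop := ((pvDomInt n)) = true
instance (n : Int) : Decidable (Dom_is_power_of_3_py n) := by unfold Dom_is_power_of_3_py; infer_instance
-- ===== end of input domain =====

-- B replaces A's divide-by-3 stripping loop with a bit-length-based closed-form
-- exponent estimate verified exactly on three candidates (objective: alternative).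

-- ===== PORT A =====
-- the while loop: state (n, k); guard 0 < n only makes the recursion total
-- (A's loop is only ever entered with n > 0, where the guard is vacuous)
def pvALoop (n : Int) (k : Int) : Int × Int :=
  if h : 0 < n ∧ PySem.Int.mod n 3 = 0 then
    pvALoop (PySem.Int.floordiv n 3) (k + 1)
  else (n, k)
termination_by n.toNat
decreasing_by
  rw [PySem.Int.floordiv_eq_ediv_of_pos (by omega)]
  omega

def is_power_of_3_py (n : Int) : Int :=
  if n ≤ 0 then -1
  else
    let p := pvALoop n 0
    if p.1 = 1 then p.2 else -1

-- ===== PORT B =====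
def is_power_of_3_py_alt (n : Int) : Int :=
  if n ≤ 0 then -1
  else
    let k : Int := PySem.Int.floordiv ((Int.ofNat (PySem.Int.bitLength n) - 1) * 53) 84
    if 0 ≤ k - 1 ∧ (3 : Int) ^ (k - 1).toNat = n then k - 1
    else if 0 ≤ k ∧ (3 : Int) ^ k.toNat = n then k
    else if 0 ≤ k + 1 ∧ (3 : Int) ^ (k + 1).toNat = n then k + 1
    else -1

-- ===== PRECONDITION & SPEC =====
def Spec_is_power_of_3_py (n : Int) (out : Int) : Prop := out = is_power_of_3_py_alt n
instance (n : Int) (out : Int) : Decidable (Spec_is_power_of_3_py n out) := by unfold Spec_is_power_of_3_py; infer_instance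

-- ===== CLAIM (what is proved, stated in full; the proofs are below) =====
def Claim_equal_is_power_of_3_py : Prop := ∀ (n : Int), Dom_is_power_of_3_py n → Spec_is_power_of_3_py n (is_power_of_3_py n)

-- ===== LEMMAS AND PROOFS =====

-- A's loop on an exact power of 3 strips all factors and counts them
theorem pvALoop_pow (e : Nat) : ∀ k : Int, pvALoop ((3 : Int) ^ e) k = (1, k + e) := by
  induction e with
  | zero => intro k; rw [pvALoop]; norm_num
  | succ e ih =>
      intro k
      rw [pvALoop]
      have h3 : (0 : Int) < 3 ^ (e + 1) := by positivity
      have hm : PySem.Int.mod ((3 : Int) ^ (e + 1)) 3 = 0 := by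
        rw [PySem.Int.mod_eq_emod_of_pos (by norm_num), pow_succ]
        simp [Int.mul_emod_left]
      have hd : PySem.Int.floordiv ((3 : Int) ^ (e + 1)) 3 = (3 : Int) ^ e := by
        rw [PySem.Int.floordiv_eq_ediv_of_pos (by norm_num), pow_succ]
        exact Int.mul_ediv_cancel _ (by norm_num)
      rw [dif_pos ⟨h3, hm⟩, hd, ih]
      push_cast
      ring_nf

-- A's loop on a positive non-power never ends at 1
theorem pvALoop_notpow (m : Nat) : ∀ n : Int, ∀ k : Int, n.toNat = m → 0 < n →
    (∀ e : Nat, n ≠ (3 : Int) ^ e) → (pvALoop n k).1 ≠ 1 := by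
  induction m using Nat.strong_induction_on with
  | _ m ih =>
      intro n k hm hn hnp
      rw [pvALoop]
      by_cases hc : PySem.Int.mod n 3 = 0
      · rw [dif_pos ⟨hn, hc⟩]
        rw [PySem.Int.mod_eq_emod_of_pos (by norm_num)] at hc
        rw [PySem.Int.floordiv_eq_ediv_of_pos (by norm_num)]
        have hdvd : (3 : Int) ∣ n := Int.dvd_of_emod_eq_zero hc
        have hlt : (n / 3).toNat < m := by omega
        refine ih _ hlt (n / 3) (k + 1) rfl (by omega) ?_
        intro e he
        apply hnp (e + 1)
        rw [pow_succ]
        obtain ⟨c, hc'⟩ := hdvd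
        have : n / 3 = c := by omega
        rw [hc', ← this, he]; ring
      · rw [dif_neg (by tauto)]
        have h1 : n ≠ 1 := by
          intro h; exact hnp 0 (by simp [h])
        simpa using h1
-- A on a positive non-power returns -1
theorem pvA_notpow (n : Int) (hn : 0 < n) (hnp : ∀ e : Nat, n ≠ (3 : Int) ^ e) :
    is_power_of_3_py n = -1 := by
  unfold is_power_of_3_py
  rw [if_neg (by omega)]
  simp only []
  rw [if_neg (pvALoop_notpow n.toNat n 0 rfl hn hnp)]

-- B on a positive non-power returns -1
theorem pvB_notpow (n : Int) (hn : 0 < n) (hnp : ∀ e : Nat, n ≠ (3 : Int) ^ e) :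
    is_power_of_3_py_alt n = -1 := by
  unfold is_power_of_3_py_alt
  rw [if_neg (by omega)]
  simp only []
  rw [if_neg (fun h => hnp _ h.2.symm), if_neg (fun h => hnp _ h.2.symm),
      if_neg (fun h => hnp _ h.2.symm)]

-- B agrees with the exponent on every power of 3 in the domain (finite check)
theorem pvB_pow (e : Nat) (he : e ≤ 19) : is_power_of_3_py_alt ((3 : Int) ^ e) = e := by
  interval_cases e <;> decide

-- ===== VERDICT (by name: the statement is the Claim_ definition above) =====
theorem is_power_of_3_py_spec : Claim_equal_is_power_of_3_py := by
  intro n hDom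
  unfold Spec_is_power_of_3_py
  simp only [Dom_is_power_of_3_py, pvDomInt, decide_eq_true_eq] at hDom
  by_cases hn : n ≤ 0
  · unfold is_power_of_3_py is_power_of_3_py_alt
    rw [if_pos hn, if_pos hn]
  · push_neg at hn
    by_cases hp : ∃ e : Nat, n = (3 : Int) ^ e
    · obtain ⟨e, rfl⟩ := hp
      have he : e ≤ 19 := by
        by_contra h
        push_neg at h
        have : (3 : Int) ^ 20 ≤ 3 ^ e := pow_le_pow_right₀ (by norm_num) h
        have h20 : (3 : Int) ^ 20 = 3486784401 := by norm_num
        omega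
      rw [pvB_pow e he]
      unfold is_power_of_3_py
      rw [if_neg (by omega)]
      simp only [pvALoop_pow e 0]
      norm_num
    · push_neg at hp
      rw [pvA_notpow n hn hp, pvB_notpow n hn hp]
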